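-- pv_equiv track=rewrite | github.com/arindhimar/BluePineapple | Python Programs/19-02-26/339.py | max_occurring_divisor_in_interval
-- ===== SOURCE A (Python) =====
-- def count_divisors(n):
--     count = 0
--     for i in range(1, n + 1):
--         if n % i == 0:
--             count += 1
--     return count
--
-- def max_occurring_divisor_in_interval(a, b):
--     max_divisors = 0
--     max_divisor = a
--     for i in range(a, b + 1):
--         divisors_count = count_divisors(i)
--         if divisors_count > max_divisors:
--             max_divisors = divisors_count
--             max_divisor = i
--     return max_divisor
-- ===== SOURCE B (Python) =====
-- def max_occurring_divisor_in_interval(a, b):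
--     best_count = 0
--     best = a
--     for i in range(a, b + 1):
--         c = 0
--         d = 1
--         while d * d <= i:
--             if i % d == 0:
--                 c += 1 if d * d == i else 2
--             d += 1
--         if c > best_count:
--             best_count = c
--             best = i
--     return best
-- ===== Notes on version B (the rewrite author's own statement) =====
-- stated objective: alternative
-- what changed: counts divisors of each i by divisor pairing up to sqrt(i) (adding 2 per small divisor, 1 for an exact square root) instead of trial-dividing by every number up to i
import Mathlib
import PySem

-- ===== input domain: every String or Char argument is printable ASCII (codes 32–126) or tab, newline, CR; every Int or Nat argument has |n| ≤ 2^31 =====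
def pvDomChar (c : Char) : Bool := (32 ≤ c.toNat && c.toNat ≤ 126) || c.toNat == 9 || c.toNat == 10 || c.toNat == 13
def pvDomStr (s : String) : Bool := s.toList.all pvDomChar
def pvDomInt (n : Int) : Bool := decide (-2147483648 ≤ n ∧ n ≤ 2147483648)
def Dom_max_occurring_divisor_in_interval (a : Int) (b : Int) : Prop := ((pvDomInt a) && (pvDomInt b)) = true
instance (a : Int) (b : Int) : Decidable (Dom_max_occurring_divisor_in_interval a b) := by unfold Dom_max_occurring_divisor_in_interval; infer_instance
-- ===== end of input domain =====

-- B counts divisors of each i by divisor pairing up to sqrt(i) instead of trial division over 1..i (objective: alternative).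

-- ===== PORT A =====
def count_divisors (n : Int) : Int :=
  (PySem.List.pyRange 1 (n + 1) 1).foldl
    (fun count i => if PySem.Int.mod n i == 0 then count + 1 else count) 0

def max_occurring_divisor_in_interval (a : Int) (b : Int) : Int :=
  ((PySem.List.pyRange a (b + 1) 1).foldl
    (fun (s : Int × Int) i =>
      let divisors_count := count_divisors i
      if s.1 < divisors_count then (divisors_count, i) else s) (0, a)).2

-- ===== PORT B =====
-- the 'while d * d <= i' loop of Source B (state: the trial divisor d and the running count c)
def pvFastAux (i : Int) (d : Int) (c : Int) : Int :=
  if _h : d * d ≤ i then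
    pvFastAux i (d + 1)
      (if PySem.Int.mod i d == 0 then (if d * d == i then c + 1 else c + 2) else c)
  else c
termination_by (i + 1 - d).toNat
decreasing_by
  have hd : d ≤ i := by nlinarith [sq_nonneg (d - 1), sq_nonneg d]
  omega

def max_occurring_divisor_in_interval_alt (a : Int) (b : Int) : Int :=
  ((PySem.List.pyRange a (b + 1) 1).foldl
    (fun (s : Int × Int) i =>
      let c := pvFastAux i 1 0
      if s.1 < c then (c, i) else s) (0, a)).2

-- ===== PRECONDITION & SPEC =====
def Spec_max_occurring_divisor_in_interval (a : Int) (b : Int) (out : Int) : Prop := out = max_occurring_divisor_in_interval_alt a b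
instance (a : Int) (b : Int) (out : Int) : Decidable (Spec_max_occurring_divisor_in_interval a b out) := by unfold Spec_max_occurring_divisor_in_interval; infer_instance

-- ===== CLAIM (what is proved, stated in full; the proofs are below) =====
def Claim_equal_max_occurring_divisor_in_interval : Prop := ∀ (a : Int) (b : Int), Dom_max_occurring_divisor_in_interval a b → Spec_max_occurring_divisor_in_interval a b (max_occurring_divisor_in_interval a b)

-- ===== LEMMAS AND PROOFS =====

-- a counting foldl is a countP
lemma pvFoldlCount (l : List Int) (p : Int → Bool) (c : Int) :
    l.foldl (fun c i => if p i then c + 1 else c) c = c + (l.countP p : Int) := by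
  induction l generalizing c with
  | nil => simp
  | cons x xs ih => by_cases h : p x <;> simp [h, ih] <;> ring

lemma cardFilterRange (n : Nat) (p : Nat → Prop) [DecidablePred p] :
    ((Finset.range n).filter p).card = (List.range n).countP (fun k => decide (p k)) := by
  induction n with
  | zero => simp
  | succ n ih =>
    rw [Finset.range_add_one, List.range_succ, Finset.filter_insert]
    by_cases h : p n <;> simp [h, ih, List.countP_append, Finset.card_insert_of_notMem]

-- A's count over 1..m is the number of divisors of m
lemma pvCountA (m : Nat) :
    count_divisors (m : Int) = (((Finset.range (m + 1)).filter (fun e => 1 ≤ e ∧ e ∣ m)).card : Int) := by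
  unfold count_divisors
  rw [PySem.List.pyRange_one, pvFoldlCount, cardFilterRange]
  have h1 : ((m : Int) + 1 - 1).toNat = m := by omega
  rw [h1, List.range_succ_eq_map, List.countP_map, List.countP_cons]
  simp only [List.countP_map, Function.comp_def, zero_add]
  congr 2
  funext k
  have hmod : PySem.Int.mod (m : Int) (1 + (k : Int)) = ((m % (1 + k) : Nat) : Int) := by
    exact_mod_cast PySem.Int.mod_natCast m (1 + k)
  rw [hmod]
  have h3 : m % (1 + k) = m % (k + 1) := by rw [Nat.add_comm]
  rw [h3]
  have hdvd : ((k : Int) + 1 ∣ (m : Int)) ↔ ((k + 1) ∣ m) := by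
    exact_mod_cast Int.natCast_dvd_natCast (m := k + 1) (n := m)
  by_cases hz : m % (k + 1) = 0 <;> simp [hz, hdvd, Nat.dvd_iff_mod_eq_zero]

-- divisors e of m with e ≥ d whose cofactor is also ≥ d: the part of the pairing not yet scanned
def pvDv (m : Nat) (d : Nat) : Finset Nat :=
  (Finset.range (m + 1)).filter (fun e => 1 ≤ e ∧ e ∣ m ∧ d ≤ e ∧ d ≤ m / e)

lemma pvDvEmpty (m d : Nat) (h : m < d * d) : pvDv m d = ∅ := by
  unfold pvDv
  rw [Finset.filter_eq_empty_iff]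
  rintro e _ ⟨he1, hdvd, hde, hdq⟩
  have hmul : m / e * e = m := Nat.div_mul_cancel hdvd
  have : d * d ≤ m := by calc d * d ≤ (m / e) * e := Nat.mul_le_mul hdq hde
                              _ = m := hmul
  omega

lemma pvDvOne (m : Nat) :
    pvDv m 1 = (Finset.range (m + 1)).filter (fun e => 1 ≤ e ∧ e ∣ m) := by
  unfold pvDv
  apply Finset.filter_congr
  intro e he
  simp only [Finset.mem_range] at he
  constructor
  · rintro ⟨h1, h2, _, _⟩; exact ⟨h1, h2⟩
  · rintro ⟨h1, h2⟩
    rcases Nat.eq_zero_or_pos m with hm | hm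
    · omega
    refine ⟨h1, h2, h1, ?_⟩
    have hem : e ≤ m := Nat.le_of_dvd hm h2
    exact (Nat.one_le_div_iff (by omega)).mpr hem

-- one step of the pairing: scanning d removes d and m/d (one element if d*d = m) from the unscanned part
lemma pvDvStep (m d : Nat) (hd : 1 ≤ d) (h : d * d ≤ m) :
    (pvDv m d).card = (if d ∣ m then (if d * d = m then 1 else 2) else 0) + (pvDv m (d + 1)).card := by
  have hm : 1 ≤ m := le_trans (by nlinarith) h
  by_cases hdvd : d ∣ m
  · have hdq : d ≤ m / d := (Nat.le_div_iff_mul_le (by omega)).mpr h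
    have hqq : m / (m / d) = d := Nat.div_div_self hdvd (by omega)
    have hqdvd : m / d ∣ m := Nat.div_dvd_of_dvd hdvd
    have hqle : m / d ≤ m := Nat.div_le_self m d
    have heq : pvDv m d = insert d (insert (m / d) (pvDv m (d + 1))) := by
      ext e
      simp only [pvDv, Finset.mem_insert, Finset.mem_filter, Finset.mem_range]
      constructor
      · rintro ⟨her, he1, hedvd, hde, hdqe⟩
        by_cases h1 : e = d
        · exact Or.inl h1
        by_cases h2 : e = m / d
        · exact Or.inr (Or.inl h2)
        refine Or.inr (Or.inr ⟨her, he1, hedvd, by omega, ?_⟩)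
        have : m / e ≠ d := by
          intro hc
          have : e = m / d := by rw [← hc, Nat.div_div_self hedvd (by omega)]
          exact h2 this
        omega
      · rintro (rfl | rfl | ⟨her, he1, hedvd, hde, hdqe⟩)
        · exact ⟨by omega, hd, hdvd, le_refl _, hdq⟩
        · exact ⟨by omega, by omega, hqdvd, hdq, by rw [hqq]⟩
        · exact ⟨her, he1, hedvd, by omega, by omega⟩
    rw [heq]
    by_cases hsq : d * d = m
    · have hqd : m / d = d := by rw [← hsq, Nat.mul_div_cancel_left d (by omega)]
      have hnotmem : d ∉ pvDv m (d + 1) := by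
        simp [pvDv]
      rw [hqd, Finset.insert_idem, Finset.card_insert_of_notMem hnotmem]
      simp [hdvd, hsq]
      omega
    · have hne : d ≠ m / d := by
        intro hc
        have : m / d * d = m := Nat.div_mul_cancel hdvd
        rw [← hc] at this; exact hsq this
      have hq_notmem : m / d ∉ pvDv m (d + 1) := by
        simp [pvDv]; intro _ _ _ _; omega
      have hnotmem_aux : d ∉ pvDv m (d + 1) := by
        simp [pvDv]
      have hd_notmem : d ∉ insert (m / d) (pvDv m (d + 1)) := by
        simp only [Finset.mem_insert, not_or]
        exact ⟨hne, hnotmem_aux⟩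
      rw [Finset.card_insert_of_notMem hd_notmem, Finset.card_insert_of_notMem hq_notmem]
      simp [hdvd, hsq]
      omega
  · have heq : pvDv m d = pvDv m (d + 1) := by
      ext e
      simp only [pvDv, Finset.mem_filter, Finset.mem_range]
      constructor
      · rintro ⟨her, he1, hedvd, hde, hdqe⟩
        have h1 : e ≠ d := by rintro rfl; exact hdvd hedvd
        have h2 : m / e ≠ d := by
          rintro hc
          exact hdvd (hc ▸ Nat.div_dvd_of_dvd hedvd)
        exact ⟨her, he1, hedvd, by omega, by omega⟩
      · rintro ⟨her, he1, hedvd, hde, hdqe⟩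
        exact ⟨her, he1, hedvd, by omega, by omega⟩
    rw [heq]
    simp [hdvd]

-- B's while loop from d upward adds exactly the unscanned weighted pair count
lemma pvFastNat (m : Nat) : ∀ (fuel : Nat) (d : Nat), 1 ≤ d → m + 1 - d ≤ fuel → ∀ (c : Int),
    pvFastAux (m : Int) (d : Int) c = c + ((pvDv m d).card : Int) := by
  intro fuel
  induction fuel with
  | zero =>
    intro d hd hfuel c
    have hmd : m < d := by omega
    have hgt : m < d * d := by nlinarith
    rw [pvFastAux, pvDvEmpty m d hgt]
    have : ¬ ((d : Int) * (d : Int) ≤ (m : Int)) := by exact_mod_cast not_le.mpr hgt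
    simp [this]
  | succ fuel ih =>
    intro d hd hfuel c
    by_cases hle : d * d ≤ m
    · have hle' : ((d : Int) * (d : Int) ≤ (m : Int)) := by exact_mod_cast hle
      rw [pvFastAux]
      simp only [hle', dif_pos]
      have hdm : d ≤ m := by nlinarith
      have hcast : ((d : Int) + 1) = ((d + 1 : Nat) : Int) := by push_cast; ring
      rw [hcast, ih (d + 1) (by omega) (by omega)]
      have hmod : (PySem.Int.mod (m : Int) (d : Int) == 0) = decide (d ∣ m) := by
        rw [PySem.Int.mod_natCast]
        by_cases hz : m % d = 0 <;>
          simp [hz, Nat.dvd_iff_mod_eq_zero, Int.natCast_dvd_natCast]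
      have hsq : ((d : Int) * (d : Int) == (m : Int)) = decide (d * d = m) := by
        by_cases hs : d * d = m <;> simp [hs] <;> exact_mod_cast hs
      rw [hmod, hsq, pvDvStep m d hd hle]
      by_cases h1 : d ∣ m <;> by_cases h2 : d * d = m <;>
        simp [h1, h2] <;> push_cast <;> ring
    · have hgt : m < d * d := by omega
      rw [pvFastAux, pvDvEmpty m d hgt]
      have : ¬ ((d : Int) * (d : Int) ≤ (m : Int)) := by exact_mod_cast not_le.mpr hgt
      simp [this]

-- the two divisor counters agree on every integer
lemma pvPointwise (i : Int) : pvFastAux i 1 0 = count_divisors i := by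
  rcases le_or_gt i 0 with hle | hpos
  · rw [pvFastAux]
    have h1 : ¬ ((1 : Int) * 1 ≤ i) := by omega
    have h2 : PySem.List.pyRange 1 (i + 1) 1 = [] := PySem.List.pyRange_one_eq_nil (by omega)
    rw [dif_neg h1]
    simp [count_divisors, h2]
  · obtain ⟨m, rfl⟩ : ∃ m : Nat, i = (m : Int) := ⟨i.toNat, by omega⟩
    have h1 : ((1 : Nat) : Int) = (1 : Int) := by norm_num
    rw [pvCountA, ← h1, pvFastNat m (m + 1) 1 (by omega) (by omega) 0, pvDvOne]
    ring

-- ===== VERDICT (by name: the statement is the Claim_ definition above) =====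
theorem max_occurring_divisor_in_interval_spec : Claim_equal_max_occurring_divisor_in_interval := by
  intro a b _
  unfold Spec_max_occurring_divisor_in_interval
  unfold max_occurring_divisor_in_interval max_occurring_divisor_in_interval_alt
  have : (fun (s : Int × Int) i =>
      let divisors_count := count_divisors i
      if s.1 < divisors_count then (divisors_count, i) else s)
      = (fun (s : Int × Int) i =>
      let c := pvFastAux i 1 0
      if s.1 < c then (c, i) else s) := by
    funext s i; simp only [pvPointwise]
  rw [this]
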